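-- pv_equiv track=rewrite | github.com/AlekseiChirkov/export-hunter | src/apps/comtrade/services/plots.py | get_data_for_specified_period_by_year
-- ===== SOURCE A (Python) =====
-- def get_data_for_specified_period_by_year(values: list | tuple,
--                                           period: int) -> list:
--     counted_month = 0
--     yearly_summ = 0
--     year_data = []
--     for month_data in values:
--         counted_month += 1
--         yearly_summ += int(month_data)
--         if counted_month % 12 == 0:
--             year_data.append(yearly_summ)
--             yearly_summ = 0
--
--         if counted_month == period:
--             break
--
--     return year_data
-- ===== SOURCE B (Python) =====
-- def get_data_for_specified_period_by_year(values, period):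
--     data = values[:period] if period > 0 else values
--     year_data = []
--     i = 0
--     while len(data) - i >= 12:
--         year_data.append(sum(int(x) for x in data[i:i + 12]))
--         i += 12
--     return year_data
-- ===== Notes on version B (the rewrite author's own statement) =====
-- stated objective: simpler
-- what changed: Replaces A's single flat pass with a month counter, %12 flush and mid-loop break by truncating the input to the period up front and then summing complete 12-element chunks in an outer per-year loop.
import Mathlib
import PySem

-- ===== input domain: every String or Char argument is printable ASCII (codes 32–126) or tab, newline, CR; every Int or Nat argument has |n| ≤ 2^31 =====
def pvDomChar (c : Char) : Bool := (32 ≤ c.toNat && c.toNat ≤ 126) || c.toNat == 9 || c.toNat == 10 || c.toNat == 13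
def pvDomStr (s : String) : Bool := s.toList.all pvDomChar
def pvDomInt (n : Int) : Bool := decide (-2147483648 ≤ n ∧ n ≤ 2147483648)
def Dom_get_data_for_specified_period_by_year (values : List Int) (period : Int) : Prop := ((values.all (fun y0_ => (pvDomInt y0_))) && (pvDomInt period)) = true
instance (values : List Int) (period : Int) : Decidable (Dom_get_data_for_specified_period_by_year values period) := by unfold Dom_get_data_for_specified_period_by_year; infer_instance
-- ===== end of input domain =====

-- B replaces A's flat month-counter pass (with %12 flush and mid-loop break) by an
-- up-front truncation to the period followed by summing complete 12-element chunks;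
-- objective: simpler. Equivalence is exact on all inputs (both programs are total here).

-- ===== PORT A =====
-- literal port of A's loop: counted_month / yearly_summ / year_data, flush every 12th
-- month, break when counted_month == period
def pvGoA (values : List Int) (period : Int) (cm : Int) (summ : Int) (acc : List Int) : List Int :=
  match values with
  | [] => acc
  | x :: rest =>
    let cm' := cm + 1
    let summ' := summ + x
    if PySem.Int.mod cm' 12 = 0 then
      let acc' := acc ++ [summ']
      if cm' = period then acc' else pvGoA rest period cm' 0 acc'
    else
      if cm' = period then acc else pvGoA rest period cm' summ' acc

def get_data_for_specified_period_by_year (values : List Int) (period : Int) : List Int :=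
  pvGoA values period 0 0 []

-- ===== PORT B =====
-- while len(data) - i >= 12: append sum(data[i:i+12]); i += 12  (cursor i : Nat, always ≥ 0;
-- values[:period] with period > 0 is List.take period.toNat — exact for a positive stop index)
def pvChunkB (data : List Int) (i : Nat) : List Int :=
  if 12 ≤ data.length - i then
    (PySem.List.slice data (some (i : Int)) (some ((i : Int) + 12))).sum :: pvChunkB data (i + 12)
  else []
termination_by data.length - i
decreasing_by omega

def get_data_for_specified_period_by_year_alt (values : List Int) (period : Int) : List Int :=
  pvChunkB (if 0 < period then values.take period.toNat else values) 0

-- ===== PRECONDITION & SPEC =====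
def Spec_get_data_for_specified_period_by_year (values : List Int) (period : Int) (out : List Int) : Prop := out = get_data_for_specified_period_by_year_alt values period
instance (values : List Int) (period : Int) (out : List Int) : Decidable (Spec_get_data_for_specified_period_by_year values period out) := by unfold Spec_get_data_for_specified_period_by_year; infer_instance

-- ===== CLAIM (what is proved, stated in full; the proofs are below) =====
def Claim_equal_get_data_for_specified_period_by_year : Prop := ∀ (values : List Int) (period : Int), Dom_get_data_for_specified_period_by_year values period → Spec_get_data_for_specified_period_by_year values period (get_data_for_specified_period_by_year values period)

-- ===== LEMMAS AND PROOFS =====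

-- proof-side view of B's while loop: chunking the suffix from the cursor onwards
def pvChunkRec (data : List Int) : List Int :=
  if 12 ≤ data.length then
    (data.take 12).sum :: pvChunkRec (data.drop 12)
  else []
termination_by data.length
decreasing_by simp [List.length_drop]; omega

theorem pvChunkB_eq_rec : ∀ (data : List Int) (i : Nat),
    pvChunkB data i = pvChunkRec (data.drop i) := by
  intro data i
  induction hn : data.length - i using Nat.strong_induction_on generalizing i with
  | _ n ih =>
    rw [pvChunkB, pvChunkRec]
    have hlen : (data.drop i).length = data.length - i := by simp
    split_ifs with h1 h2 h2
    · have hcast : ((i : Int) + 12) = (((i + 12 : Nat)) : Int) := by push_cast; ring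
      rw [hcast, PySem.List.slice_natCast]
      have h12 : i + 12 - i = 12 := by omega
      rw [h12, ih (data.length - (i + 12)) (by omega) (i + 12) rfl]
      simp [List.drop_drop]
    · omega
    · omega
    · rfl

-- proof-side bridge: chunking with a partial chunk of r elements and partial sum `summ`
def pvChunkAux (data : List Int) (r : Nat) (summ : Int) : List Int :=
  match data with
  | [] => []
  | x :: rest =>
    if (r + 1) % 12 = 0 then (summ + x) :: pvChunkAux rest 0 0
    else pvChunkAux rest ((r + 1) % 12) (summ + x)

theorem pvChunkAux_shape : ∀ (data : List Int) (r : Nat) (summ : Int), r < 12 →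
    pvChunkAux data r summ =
      if data.length < 12 - r then []
      else (summ + (data.take (12 - r)).sum) :: pvChunkAux (data.drop (12 - r)) 0 0 := by
  intro data
  induction data with
  | nil =>
    intro r summ hr
    simp [pvChunkAux]
    omega
  | cons x rest ih =>
    intro r summ hr
    by_cases h11 : r = 11
    · subst h11
      simp [pvChunkAux]
    · have hmod : (r + 1) % 12 = r + 1 := by omega
      have h12 : 12 - r = (12 - (r + 1)) + 1 := by omega
      simp only [pvChunkAux, hmod, if_neg (by omega : ¬ r + 1 = 0)]
      rw [ih (r + 1) (summ + x) (by omega), h12]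
      simp only [List.take_succ_cons, List.drop_succ_cons, List.length_cons, List.sum_cons]
      split_ifs with h1 h2 h2 <;> try omega
      · rfl
      · simp [add_assoc]

theorem pvChunkAux_eq_chunkB : ∀ (n : Nat) (data : List Int), data.length ≤ n →
    pvChunkAux data 0 0 = pvChunkRec data := by
  intro n
  induction n with
  | zero =>
    intro data h
    have : data = [] := by
      cases data with
      | nil => rfl
      | cons a b => simp at h
    subst this
    simp [pvChunkAux, pvChunkRec]
  | succ n ih =>
    intro data h
    rw [pvChunkAux_shape data 0 0 (by omega), pvChunkRec]
    split_ifs with h1 h2 h2 <;> try omega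
    · rfl
    · rw [ih (data.drop 12) (by simp [List.length_drop]; omega)]
      simp

theorem pvGoA_eq : ∀ (values : List Int) (period cm summ : Int) (acc : List Int),
    0 ≤ cm → (period ≤ 0 ∨ cm < period) →
    pvGoA values period cm summ acc =
      acc ++ pvChunkAux (if 0 < period then values.take (period - cm).toNat else values)
                        ((cm % 12).toNat) summ := by
  intro values
  induction values with
  | nil =>
    intro period cm summ acc h0 hp
    simp only [pvGoA]
    split <;> simp [pvChunkAux]
  | cons x rest ih =>
    intro period cm summ acc h0 hp
    have hmod12 : PySem.Int.mod (cm + 1) 12 = (cm + 1) % 12 :=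
      PySem.Int.mod_eq_emod_of_pos (by norm_num)
    by_cases hbreak : cm + 1 = period
    · -- break fires: exactly one more month is consumed
      have hpos : 0 < period := by omega
      have htake : (period - cm).toNat = 1 := by omega
      by_cases hm : (cm + 1) % 12 = 0
      · have hr : ((cm % 12).toNat + 1) % 12 = 0 := by omega
        simp [pvGoA, hbreak, hpos, htake, pvChunkAux, hr]
        omega
      · have hr : ¬ ((cm % 12).toNat + 1) % 12 = 0 := by omega
        simp [pvGoA, hbreak, hpos, htake, pvChunkAux, hr]
        omega
    · -- no break: one step of the loop = one step of pvChunkAux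
      have hp' : period ≤ 0 ∨ cm + 1 < period := by omega
      have heff : (if 0 < period then (x :: rest).take (period - cm).toNat else x :: rest)
          = x :: (if 0 < period then rest.take (period - (cm + 1)).toNat else rest) := by
        split_ifs with hpos
        · have : (period - cm).toNat = (period - (cm + 1)).toNat + 1 := by omega
          rw [this, List.take_succ_cons]
        · rfl
      by_cases hm : (cm + 1) % 12 = 0
      · have hr : ((cm % 12).toNat + 1) % 12 = 0 := by omega
        have hcast : (((cm + 1) % 12).toNat) = 0 := by omega
        rw [pvGoA]
        simp only [hmod12, hm, if_neg hbreak]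
        rw [ih period (cm + 1) 0 (acc ++ [summ + x]) (by omega) hp', heff, hcast]
        simp [pvChunkAux, hr]
      · have hr : ¬ ((cm % 12).toNat + 1) % 12 = 0 := by omega
        have hcast : (((cm + 1) % 12).toNat) = ((cm % 12).toNat + 1) % 12 := by omega
        rw [pvGoA]
        simp only [hmod12, if_neg hm, if_neg hbreak]
        rw [ih period (cm + 1) (summ + x) acc (by omega) hp', heff, hcast]
        simp [pvChunkAux, hr]

-- ===== VERDICT (by name: the statement is the Claim_ definition above) =====
theorem get_data_for_specified_period_by_year_spec : Claim_equal_get_data_for_specified_period_by_year := by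
  intro values period _
  unfold Spec_get_data_for_specified_period_by_year
  unfold get_data_for_specified_period_by_year get_data_for_specified_period_by_year_alt
  rw [pvGoA_eq values period 0 0 [] (by omega) (by omega)]
  have : ((0 : Int) % 12).toNat = 0 := by omega
  rw [this]
  simp only [sub_zero, List.nil_append]
  rw [pvChunkB_eq_rec _ 0, List.drop_zero]
  exact pvChunkAux_eq_chunkB _ _ (le_refl _)
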